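-- pv_equiv track=rewrite | github.com/MaxDoornbosch/ProteinPower | code/helper/nfold.py | calculate_best_options
-- ===== SOURCE A (Python) =====
-- def calculate_best_options(possible_options_score):
--     """
--     Finds all the best options
--     """
--     lowest_stability_score = 0
--     best_options = []
--
--     # finds lower bound
--     for value in possible_options_score:
--         if value[len(value) - 1] < lowest_stability_score:
--             lowest_stability_score = value[len(value) - 1]
--
--     # saves options with lower bound
--     for value in possible_options_score:
--         if value[len(value) - 1] == lowest_stability_score:
--             best_options.append(value)
--     return best_options
-- ===== SOURCE B (Python) =====
-- def calculate_best_options(possible_options_score):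
--     """Finds all the best options (single pass, reset on new minimum)."""
--     lowest_stability_score = 0
--     best_options = []
--     for value in possible_options_score:
--         score = value[-1]
--         if score < lowest_stability_score:
--             lowest_stability_score = score
--             best_options = [value]
--         elif score == lowest_stability_score:
--             best_options.append(value)
--     return best_options
-- ===== Notes on version B (the rewrite author's own statement) =====
-- stated objective: alternative
-- what changed: Fuses A's two scans (find minimum, then collect matches) into one pass that keeps the running minimum seeded at 0 and resets the collected list whenever a strictly lower score appears.
import Mathlib
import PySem

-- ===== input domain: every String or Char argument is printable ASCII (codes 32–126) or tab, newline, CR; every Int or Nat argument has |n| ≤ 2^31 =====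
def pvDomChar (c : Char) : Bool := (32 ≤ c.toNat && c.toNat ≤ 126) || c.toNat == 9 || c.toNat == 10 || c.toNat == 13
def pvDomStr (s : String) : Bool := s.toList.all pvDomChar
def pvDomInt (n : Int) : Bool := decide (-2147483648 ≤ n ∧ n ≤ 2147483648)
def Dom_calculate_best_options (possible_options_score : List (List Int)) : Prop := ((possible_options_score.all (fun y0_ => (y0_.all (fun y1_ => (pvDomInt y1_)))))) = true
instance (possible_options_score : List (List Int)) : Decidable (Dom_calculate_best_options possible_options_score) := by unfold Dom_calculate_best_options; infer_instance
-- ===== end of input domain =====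

-- B fuses A's two scans into one pass with reset-on-new-minimum; alternative decomposition, same O(n) cost.

-- ===== PORT A =====
-- value[len(value) - 1]; Python raises IndexError on an empty value — Pre_ excludes that, default 0 is never used inside Pre_
def lastA (value : List Int) : Int := (PySem.List.pyGet? value ((value.length : Int) - 1)).getD 0

def calculate_best_options (possible_options_score : List (List Int)) : List (List Int) :=
  let lowest_stability_score :=
    possible_options_score.foldl
      (fun lowest value => if lastA value < lowest then lastA value else lowest) 0
  possible_options_score.foldl
    (fun best_options value =>
      if lastA value == lowest_stability_score then best_options ++ [value] else best_options) []

-- ===== PORT B =====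
-- value[-1]; Python raises IndexError on an empty value — Pre_ excludes that, default 0 is never used inside Pre_
def lastB (value : List Int) : Int := (PySem.List.pyGet? value (-1)).getD 0

def calculate_best_options_alt (possible_options_score : List (List Int)) : List (List Int) :=
  (possible_options_score.foldl
    (fun (s : Int × List (List Int)) value =>
      let score := lastB value
      if score < s.1 then (score, [value])
      else if score == s.1 then (s.1, s.2 ++ [value])
      else s) (0, [])).2

-- ===== PRECONDITION & SPEC =====
-- Pre_: every inner list is nonempty — Python A raises IndexError on value[len(value)-1] for an empty value.
def Pre_calculate_best_options (possible_options_score : List (List Int)) : Prop :=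
  ∀ v ∈ possible_options_score, v ≠ []
instance (possible_options_score : List (List Int)) : Decidable (Pre_calculate_best_options possible_options_score) := by unfold Pre_calculate_best_options; infer_instance
def pvWitness_calculate_best_options : List (List Int) := [[1, -3], [2, -3], [0, 5]]

def Spec_calculate_best_options (possible_options_score : List (List Int)) (out : List (List Int)) : Prop := out = calculate_best_options_alt possible_options_score
instance (possible_options_score : List (List Int)) (out : List (List Int)) : Decidable (Spec_calculate_best_options possible_options_score out) := by unfold Spec_calculate_best_options; infer_instance

-- ===== CLAIM (what is proved, stated in full; the proofs are below) =====
def Claim_equal_calculate_best_options : Prop := ∀ (possible_options_score : List (List Int)), Dom_calculate_best_options possible_options_score → Pre_calculate_best_options possible_options_score → Spec_calculate_best_options possible_options_score (calculate_best_options possible_options_score)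

-- ===== LEMMAS AND PROOFS =====

-- both ports read the last element the same way (on [] both indices are out of range and default to 0)
theorem lastB_eq_lastA : lastB = lastA := by
  funext v
  cases v with
  | nil => rfl
  | cons x xs =>
    simp [lastA, lastB, PySem.List.pyGet?, PySem.List.pyIdx?]

-- the running minimum seeded at `low`
def minA (low : Int) (xs : List (List Int)) : Int :=
  xs.foldl (fun lowest value => if lastA value < lowest then lastA value else lowest) low

theorem minA_le (low : Int) (xs : List (List Int)) : minA low xs ≤ low := by
  induction xs generalizing low with
  | nil => simp [minA]
  | cons v rest ih =>
    simp only [minA, List.foldl_cons]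
    by_cases h : lastA v < low
    · simp only [h, if_pos]
      exact le_trans (ih (lastA v)) (le_of_lt h)
    · simp only [h, if_neg, not_false_iff]
      exact ih low

-- single-pass invariant: B's fold from (low, best) yields the global minimum and the
-- matching elements, keeping `best` exactly when no strictly smaller score appears.
theorem foldB_spec (xs : List (List Int)) (low : Int) (best : List (List Int)) :
    xs.foldl
      (fun (s : Int × List (List Int)) value =>
        let score := lastA value
        if score < s.1 then (score, [value])
        else if score == s.1 then (s.1, s.2 ++ [value])
        else s) (low, best)
    = (minA low xs,
       (if minA low xs = low then best else []) ++
         xs.filter (fun v => lastA v == minA low xs)) := by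
  induction xs generalizing low best with
  | nil => simp [minA]
  | cons v rest ih =>
    simp only [List.foldl_cons, List.filter_cons]
    by_cases h1 : lastA v < low
    · have hm : minA low (v :: rest) = minA (lastA v) rest := by
        simp [minA, h1]
      have hle : minA (lastA v) rest ≤ lastA v := minA_le _ _
      have hne : minA (lastA v) rest ≠ low := by omega
      rw [hm, if_pos h1, ih, if_neg hne]
      by_cases h2 : minA (lastA v) rest = lastA v
      · simp [h2]
      · have : (lastA v == minA (lastA v) rest) = false := by simp; omega
        simp [this, h2]
    · have hm : minA low (v :: rest) = minA low rest := by
        simp [minA, h1]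
      have hle : minA low rest ≤ low := minA_le _ _
      rw [hm]
      by_cases h2 : lastA v = low
      · have hb : (lastA v == low) = true := by simp [h2]
        rw [if_neg h1, if_pos hb, ih]
        by_cases h3 : minA low rest = low
        · simp [h3, h2]
        · have : (lastA v == minA low rest) = false := by simp; omega
          simp [h3, this]
      · have hb : (lastA v == low) = false := by simp [h2]
        rw [if_neg h1, if_neg (by simp [hb]), ih]
        have : (lastA v == minA low rest) = false := by simp; omega
        simp [this]

-- A's second loop is a filter
theorem foldA_filter (xs : List (List Int)) (m : Int) (acc : List (List Int)) :
    xs.foldl (fun best value => if lastA value == m then best ++ [value] else best) acc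
    = acc ++ xs.filter (fun v => lastA v == m) := by
  induction xs generalizing acc with
  | nil => simp
  | cons v rest ih =>
    simp only [List.foldl_cons, List.filter_cons]
    by_cases h : (lastA v == m) = true
    · rw [if_pos h, ih, if_pos h]; simp
    · rw [if_neg h, ih, if_neg h]

-- ===== VERDICT (by name: the statement is the Claim_ definition above) =====
theorem calculate_best_options_spec : Claim_equal_calculate_best_options := by
  intro xs _ _
  unfold Spec_calculate_best_options calculate_best_options calculate_best_options_alt
  rw [lastB_eq_lastA]
  rw [foldB_spec xs 0 []]
  rw [foldA_filter]
  simp [minA]
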